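-- pv_equiv track=rewrite | github.com/ch0002ic-prog/acg-search | app/database.py | _collapse_article_remap
-- ===== SOURCE A (Python) =====
-- def _collapse_article_remap(interaction_remap: dict[str, str]) -> dict[str, str]:
--     collapsed: dict[str, str] = {}
--     for source_id, target_id in interaction_remap.items():
--         resolved_target = target_id
--         seen = {source_id}
--         while resolved_target in interaction_remap and resolved_target not in seen:
--             seen.add(resolved_target)
--             resolved_target = interaction_remap[resolved_target]
--         if resolved_target != source_id:
--             collapsed[source_id] = resolved_target
--     return collapsed
-- ===== SOURCE B (Python) =====
-- def _collapse_article_remap(interaction_remap: dict[str, str]) -> dict[str, str]: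
--     # Memoized chain resolution: each node's terminal is computed once and reused,
--     # so every edge of the remap graph is walked O(1) amortized times.
--     memo: dict[str, str] = {}
--     for start in interaction_remap:
--         if start in memo:
--             continue
--         path: list[str] = []
--         on_path: set[str] = set()
--         node = start
--         while node in interaction_remap and node not in memo and node not in on_path:
--             on_path.add(node)
--             path.append(node)
--             node = interaction_remap[node]
--         if node in on_path:
--             # walked onto a new cycle: members resolve to themselves,
--             # the tail before the cycle resolves to the re-entry node
--             i = path.index(node)
--             for p in path[:i]:
--                 memo[p] = node
--             for p in path[i:]:
--                 memo[p] = p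
--         else:
--             # dead end (non-key) or an already-resolved node
--             terminal = memo.get(node, node)
--             for p in path:
--                 memo[p] = terminal
--     out: dict[str, str] = {}
--     for s in interaction_remap:
--         t = memo.get(s, s)
--         if t != s:
--             out[s] = t
--     return out
-- ===== Notes on version B (the rewrite author's own statement) =====
-- stated objective: alternative
-- what changed: B memoizes each node's terminal: it walks a chain once, records the resolved target for every node on the walked path (resolving a freshly found cycle's members to themselves and the tail to the re-entry node), and reads the answer for each key out of the memo, instead of A's re-walking the whole chain from scratch for every key.
import Mathlib
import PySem

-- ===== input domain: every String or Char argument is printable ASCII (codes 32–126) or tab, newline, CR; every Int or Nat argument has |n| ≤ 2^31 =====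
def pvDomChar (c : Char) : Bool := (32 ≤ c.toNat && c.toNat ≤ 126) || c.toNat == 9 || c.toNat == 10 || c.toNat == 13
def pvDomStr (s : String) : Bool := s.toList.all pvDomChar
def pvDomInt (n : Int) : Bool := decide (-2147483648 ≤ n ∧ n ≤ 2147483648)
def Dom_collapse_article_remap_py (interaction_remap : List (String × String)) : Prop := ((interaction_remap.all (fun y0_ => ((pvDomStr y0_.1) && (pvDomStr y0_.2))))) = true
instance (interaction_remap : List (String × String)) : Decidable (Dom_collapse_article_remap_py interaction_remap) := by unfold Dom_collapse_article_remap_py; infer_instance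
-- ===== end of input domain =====

-- B memoizes each node's terminal so every chain is walked once instead of A's per-key re-walk; same return value.

-- ===== PORT A =====
-- A's while loop: 'while resolved in map and resolved not in seen: seen.add(resolved); resolved = map[resolved]'.
-- Fuel m.size + 1 bounds the iteration count (each iteration adds a fresh key to seen); it is proved never to run out.
def pyA_loop (m : PySem.Dict String String) : Nat → String → PySem.Set String → String
  | 0, resolved, _ => resolved
  | f+1, resolved, seen =>
    if m.contains resolved && !(PySem.Set.contains seen resolved) then
      pyA_loop m f (m.getD resolved "") (PySem.Set.add seen resolved)
    else resolved

def collapse_article_remap_py (interaction_remap : List (String × String)) : List (String × String) :=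
  let m := PySem.Dict.ofList interaction_remap
  (m.items.foldl (fun (collapsed : PySem.Dict String String) p =>
      let r := pyA_loop m (m.size + 1) p.2 (PySem.Set.ofList [p.1])
      if r ≠ p.1 then collapsed.insert p.1 r else collapsed)
    PySem.Dict.empty).items

-- ===== PORT B =====
-- B's inner walk: 'while node in interaction_remap and node not in memo and node not in on_path: …'.
-- Fuel m.size + 1 bounds the iteration count (each iteration consumes a fresh unmemoized key); proved never to run out.
def pyB_walk (m memo : PySem.Dict String String) :
    Nat → String → List String → PySem.Set String → (List String × PySem.Set String × String)
  | 0, node, path, onp => (path, onp, node)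
  | f+1, node, path, onp =>
    if m.contains node && !(memo.contains node) && !(PySem.Set.contains onp node) then
      pyB_walk m memo f (m.getD node "") (path ++ [node]) (PySem.Set.add onp node)
    else (path, onp, node)

-- the if/else after the walk: record the resolution for every node of the walked path
def pyB_assign (memo : PySem.Dict String String) (path : List String) (onp : PySem.Set String)
    (node : String) : PySem.Dict String String :=
  if PySem.Set.contains onp node then
    -- i = path.index(node): node ∈ path in this branch, so index? is some; path[:i] / path[i:]
    -- with 0 ≤ i ≤ len(path) are exactly take i / drop i
    let i := (PySem.List.index? path node).getD 0
    let memo1 := (path.take i).foldl (fun mm p => mm.insert p node) memo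
    (path.drop i).foldl (fun mm p => mm.insert p p) memo1
  else
    let terminal := memo.getD node node   -- memo.get(node, node)
    path.foldl (fun mm p => mm.insert p terminal) memo

def collapse_article_remap_py_alt (interaction_remap : List (String × String)) : List (String × String) :=
  let m := PySem.Dict.ofList interaction_remap
  let memo := m.keys.foldl (fun memo start =>
      if memo.contains start then memo
      else
        match pyB_walk m memo (m.size + 1) start [] PySem.Set.empty with
        | (path, onp, node) => pyB_assign memo path onp node) PySem.Dict.empty
  (m.keys.foldl (fun (out : PySem.Dict String String) s =>
      let t := memo.getD s s
      if t ≠ s then out.insert s t else out) PySem.Dict.empty).items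

-- ===== PRECONDITION & SPEC =====
def Spec_collapse_article_remap_py (interaction_remap : List (String × String)) (out : List (String × String)) : Prop := out = collapse_article_remap_py_alt interaction_remap
instance (interaction_remap : List (String × String)) (out : List (String × String)) : Decidable (Spec_collapse_article_remap_py interaction_remap out) := by unfold Spec_collapse_article_remap_py; infer_instance

-- ===== CLAIM (what is proved, stated in full; the proofs are below) =====
def Claim_equal_collapse_article_remap_py : Prop := ∀ (interaction_remap : List (String × String)), Dom_collapse_article_remap_py interaction_remap → Spec_collapse_article_remap_py interaction_remap (collapse_article_remap_py interaction_remap)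

-- ===== LEMMAS AND PROOFS =====

-- the outer-fold body of B, named so the proofs can speak about one step
def pvBody (m : PySem.Dict String String) (memo : PySem.Dict String String) (start : String) :
    PySem.Dict String String :=
  if memo.contains start then memo
  else
    match pyB_walk m memo (m.size + 1) start [] PySem.Set.empty with
    | (path, onp, node) => pyB_assign memo path onp node

-- 'c is a chain in m ending with an edge into t': every element is a key mapping to its successor
def pvChain (m : PySem.Dict String String) : List String → String → Prop
  | [], _ => True
  | c :: cs, t => m.contains c = true ∧ m.getD c "" = cs.headD t ∧ pvChain m cs t

-- number of keys of m not blocked by the seen-set S: the termination measure of A's while loop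
def pvMu (m : PySem.Dict String String) (S : List String) : Nat :=
  (m.keys.filter (fun k => !(List.contains S k))).length

-- number of keys of m neither memoized nor on the walked path: termination measure of B's walk
def pvMuW (m memo : PySem.Dict String String) (path : List String) : Nat :=
  (m.keys.filter (fun k => !(memo.contains k || List.contains path k))).length

theorem pv_filter_len_dec {l : List String} {bad : String → Bool} {a : String}
    (hnd : l.Nodup) (ha : a ∈ l) (hba : bad a = false) :
    (l.filter (fun k => !(bad k || k == a))).length + 1 = (l.filter (fun k => !(bad k))).length := by
  induction l with
  | nil => simp at ha
  | cons b t ih =>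
    rcases List.nodup_cons.1 hnd with ⟨hbt, hndt⟩
    rcases List.mem_cons.1 ha with h | h
    · subst h
      have hft : List.filter (fun k => !(bad k || k == a)) t = List.filter (fun k => !(bad k)) t := by
        apply List.filter_congr
        intro x hx
        have hxa : x ≠ a := fun he => hbt (he ▸ hx)
        simp [hxa]
      rw [List.filter_cons, List.filter_cons, hft]
      simp [hba]
    · have he : b ≠ a := fun hh => hbt (hh ▸ h)
      have := ih hndt h
      rw [List.filter_cons, List.filter_cons]
      simp only [Bool.not_or] at this ⊢
      rcases hb : bad b with _ | _ <;> simp [he] <;> omega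

theorem pvMu_dec {m : PySem.Dict String String} (hnd : m.keys.Nodup) {a : String} {S : List String}
    (ha : a ∈ m.keys) (hS : a ∉ S) : pvMu m (S ++ [a]) + 1 = pvMu m S := by
  unfold pvMu
  have hcongr : m.keys.filter (fun k => !(List.contains (S ++ [a]) k))
      = m.keys.filter (fun k => !(List.contains S k || k == a)) := by
    apply List.filter_congr; intro x _
    simp [beq_eq_decide, eq_comm]
  rw [hcongr]
  exact pv_filter_len_dec (bad := fun k => List.contains S k) hnd ha (by simp [hS])

theorem pvMu_append {m : PySem.Dict String String} (hnd : m.keys.Nodup) :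
    ∀ (c S : List String), (∀ x ∈ c, x ∈ m.keys) → c.Nodup → (∀ x ∈ c, x ∉ S) →
    pvMu m (S ++ c) + c.length = pvMu m S := by
  intro c
  induction c with
  | nil => intro S _ _ _; simp
  | cons a cs ih =>
    intro S hmem hndc hdis
    rcases List.nodup_cons.1 hndc with ⟨hacs, hndcs⟩
    have h1 := ih (S ++ [a]) (fun x hx => hmem x (List.mem_cons_of_mem _ hx)) hndcs
      (by intro x hx
          simp only [List.mem_append, List.mem_singleton]
          rintro (h | h)
          · exact hdis x (List.mem_cons_of_mem _ hx) h
          · exact hacs (h ▸ hx))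
    have h2 := pvMu_dec hnd (hmem a (List.mem_cons_self ..)) (hdis a (List.mem_cons_self ..))
    have hcongr : pvMu m (S ++ a :: cs) = pvMu m ((S ++ [a]) ++ cs) := by
      unfold pvMu
      apply congrArg
      apply List.filter_congr; intro x _; simp
    rw [hcongr]
    simp only [List.length_cons]
    omega

theorem pvChain_append {m : PySem.Dict String String} {xs ys : List String} {t : String} :
    pvChain m (xs ++ ys) t ↔ pvChain m xs (ys.headD t) ∧ pvChain m ys t := by
  induction xs with
  | nil => simp [pvChain]
  | cons x xs ih =>
    simp only [List.cons_append, pvChain, ih]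
    have : (xs ++ ys).headD t = xs.headD (ys.headD t) := by
      cases xs <;> simp
    rw [this]
    tauto

theorem pyA_loop_stop {m : PySem.Dict String String} {f : Nat} {r : String} {S : PySem.Set String}
    (h : (m.contains r && !(PySem.Set.contains S r)) = false) (hf : 1 ≤ f) :
    pyA_loop m f r S = r := by
  cases f with
  | zero => rfl
  | succ f =>
    simp only [pyA_loop]
    rw [h]
    simp

theorem pyA_loop_chain {m : PySem.Dict String String} (hnd : m.keys.Nodup) :
    ∀ (c : List String) (t : String) (S : PySem.Set String) (f : Nat),
    pvChain m c t → c.Nodup → (∀ x ∈ c, x ∉ S) →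
    pvMu m S + 1 ≤ f →
    pyA_loop m f (c.headD t) S = pyA_loop m (f - c.length) t (S ++ c) := by
  intro c
  induction c with
  | nil => intro t S f _ _ _ _; simp
  | cons a cs ih =>
    intro t S f hch hndc hdis hf
    rcases hch with ⟨hak, hnext, hch⟩
    rcases List.nodup_cons.1 hndc with ⟨hacs, hndcs⟩
    have haS : a ∉ S := hdis a (List.mem_cons_self ..)
    cases f with
    | zero => omega
    | succ f =>
      have hadd : PySem.Set.add S a = S ++ [a] := PySem.Set.add_of_not_mem haS
      have hstep : pyA_loop m (f+1) ((a :: cs).headD t) S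
          = pyA_loop m f (cs.headD t) (S ++ [a]) := by
        simp [pyA_loop, hak, haS, hnext]
      rw [hstep]
      have hlen := pvMu_dec hnd (PySem.Dict.contains_iff_mem_keys _ _ |>.1 hak) haS
      have := ih t (S ++ [a]) f hch hndcs
        (by intro x hx
            simp only [List.mem_append, List.mem_singleton]
            rintro (h | h)
            · exact hdis x (List.mem_cons_of_mem _ hx) h
            · exact hacs (h ▸ hx))
        (by omega)
      rw [this, List.append_assoc, List.singleton_append]
      congr 1
      simp [Nat.succ_sub_succ]

-- one chain descent plus the remaining-fuel bookkeeping
theorem pvLoop_descend {m : PySem.Dict String String} (hnd : m.keys.Nodup)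
    {c : List String} {t : String} {S : PySem.Set String} {f : Nat}
    (hch : pvChain m c t) (hndc : c.Nodup) (hkeys : ∀ z ∈ c, z ∈ m.keys)
    (hdis : ∀ z ∈ c, z ∉ S) (hf : pvMu m S + 1 ≤ f) :
    pyA_loop m f (c.headD t) S = pyA_loop m (f - c.length) t (S ++ c) ∧
    pvMu m (S ++ c) + 1 ≤ f - c.length := by
  have h1 := pyA_loop_chain hnd c t S f hch hndc hdis hf
  have h2 := pvMu_append hnd c S hkeys hndc hdis
  exact ⟨h1, by omega⟩

-- a node on a cycle resolves to itself: descend the rotated cycle and stop at the revisit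
theorem pvVal_cycle {m : PySem.Dict String String} (hnd : m.keys.Nodup)
    {c : List String} {x : String} {S : PySem.Set String} {f : Nat}
    (hch : pvChain m c x) (hhd : c.headD x = x) (hxc : x ∈ c)
    (hndc : c.Nodup) (hkeys : ∀ z ∈ c, z ∈ m.keys) (hdis : ∀ z ∈ c, z ∉ S)
    (hf : pvMu m S + 1 ≤ f) :
    pyA_loop m f x S = x := by
  obtain ⟨h1, h2⟩ := pvLoop_descend hnd hch hndc hkeys hdis hf
  rw [hhd] at h1
  rw [h1]
  apply pyA_loop_stop
  · simp [hxc]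
  · omega

-- descend from x ∈ ext to the stop node node', with the accumulated seen set and fuel accounted
theorem pvVal_to_stop {m : PySem.Dict String String} (hnd : m.keys.Nodup)
    {ext : List String} {node' : String} {S : PySem.Set String} {f : Nat} {x : String}
    (hch : pvChain m ext node') (hndext : ext.Nodup) (hkeys : ∀ z ∈ ext, z ∈ m.keys)
    (hdis : ∀ z ∈ ext, z ∉ S) (hx : x ∈ ext)
    (hf : pvMu m S + 1 ≤ f) :
    ∃ (c : List String) (g : Nat),
      (∀ z ∈ c, z ∈ ext) ∧ pyA_loop m f x S = pyA_loop m g node' (S ++ c) ∧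
      pvMu m (S ++ c) + 1 ≤ g := by
  obtain ⟨e1, e2, rfl⟩ := List.append_of_mem hx
  have hchc : pvChain m (x :: e2) node' := (pvChain_append.1 hch).2
  have hndc : (x :: e2).Nodup := hndext.of_append_right
  refine ⟨x :: e2, f - (x :: e2).length, fun z hz => List.mem_append_right _ hz, ?_, ?_⟩
  · have := (pvLoop_descend hnd hchc hndc
      (fun z hz => hkeys z (List.mem_append_right _ hz))
      (fun z hz => hdis z (List.mem_append_right _ hz)) hf).1
    simpa using this
  · exact (pvLoop_descend hnd hchc hndc
      (fun z hz => hkeys z (List.mem_append_right _ hz))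
      (fun z hz => hdis z (List.mem_append_right _ hz)) hf).2

-- a node strictly before the re-entry node node' of a cycle resolves to node'
theorem pvVal_tail {m : PySem.Dict String String} (hnd : m.keys.Nodup)
    {pre suf : List String} {node' : String} {S : PySem.Set String} {f : Nat} {x : String}
    (hch : pvChain m (pre ++ node' :: suf) node') (hndext : (pre ++ node' :: suf).Nodup)
    (hkeys : ∀ z ∈ pre ++ node' :: suf, z ∈ m.keys)
    (hdis : ∀ z ∈ pre ++ node' :: suf, z ∉ S) (hx : x ∈ pre)
    (hf : pvMu m S + 1 ≤ f) :
    pyA_loop m f x S = node' := by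
  obtain ⟨e1, e2, hpre⟩ := List.append_of_mem hx
  have hext : pre ++ node' :: suf = e1 ++ (x :: (e2 ++ node' :: suf)) := by
    rw [hpre]; simp
  have hchc : pvChain m (x :: (e2 ++ node' :: suf)) node' := by
    have := (pvChain_append.1 (hext ▸ hch)).2
    exact this
  have hndc : (x :: (e2 ++ node' :: suf)).Nodup := (hext ▸ hndext).of_append_right
  have hsubc : ∀ z ∈ x :: (e2 ++ node' :: suf), z ∈ pre ++ node' :: suf := by
    intro z hz
    rw [hext]
    exact List.mem_append_right _ hz
  obtain ⟨h1, h2⟩ := pvLoop_descend hnd hchc hndc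
    (fun z hz => hkeys z (hsubc z hz)) (fun z hz => hdis z (hsubc z hz)) hf
  simp only [List.headD_cons] at h1
  rw [h1]
  apply pyA_loop_stop
  · have : node' ∈ S ++ x :: (e2 ++ node' :: suf) := by
      apply List.mem_append_right
      exact List.mem_cons_of_mem _ (List.mem_append_right _ (List.mem_cons_self ..))
    simp [this]
  · omega

theorem foldl_insert_const_get? (v : String) :
    ∀ (seg : List String) (memo : PySem.Dict String String) (x : String),
    (seg.foldl (fun mm p => mm.insert p v) memo).get? x
      = if x ∈ seg then some v else memo.get? x := by
  intro seg
  induction seg with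
  | nil => simp
  | cons p rest ih =>
    intro memo x
    simp only [List.foldl_cons, ih]
    by_cases hx : x ∈ rest
    · simp [hx]
    · by_cases hxp : x = p
      · subst hxp
        simp [hx, PySem.Dict.get?_insert_self]
      · simp [hx, hxp, PySem.Dict.get?_insert_of_ne _ _ hxp]

theorem foldl_insert_self_get? :
    ∀ (seg : List String) (memo : PySem.Dict String String) (x : String), seg.Nodup →
    (seg.foldl (fun mm p => mm.insert p p) memo).get? x
      = if x ∈ seg then some x else memo.get? x := by
  intro seg
  induction seg with
  | nil => simp
  | cons p rest ih =>
    intro memo x hnd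
    rcases List.nodup_cons.1 hnd with ⟨hpr, hndr⟩
    simp only [List.foldl_cons, ih _ _ hndr]
    by_cases hx : x ∈ rest
    · simp [hx]
    · by_cases hxp : x = p
      · subst hxp
        simp [hx, PySem.Dict.get?_insert_self]
      · simp [hx, hxp, PySem.Dict.get?_insert_of_ne _ _ hxp]

theorem pv_getD_default_of_mem {d : PySem.Dict String String} {k : String}
    (h : k ∈ d.keys) (a b : String) : d.getD k a = d.getD k b := by
  rcases ho : d.get? k with _ | v
  · exact absurd ((PySem.Dict.get?_eq_none_iff_not_mem_keys _ _).1 ho) (by simp [h])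
  · rw [PySem.Dict.getD_of_get?_eq_some _ _ ho, PySem.Dict.getD_of_get?_eq_some _ _ ho]

theorem pv_mem_keys_iff_get? {d : PySem.Dict String String} {k : String} :
    k ∈ d.keys ↔ d.get? k ≠ none := by
  rw [ne_eq, PySem.Dict.get?_eq_none_iff_not_mem_keys]
  tauto

theorem pv_not_mem_keys {d : PySem.Dict String String} {k : String}
    (h : d.contains k = false) : k ∉ d.keys := by
  intro hk
  rw [(PySem.Dict.contains_iff_mem_keys _ _).2 hk] at h
  cases h

-- the loop invariant of B's outer fold: every memoized key is a key of m, and the memoized value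
-- is exactly what A's while loop computes from that node under any seen-set disjoint from the memo
def pvInv (m memo : PySem.Dict String String) : Prop :=
  (∀ k ∈ memo.keys, k ∈ m.keys) ∧
  (∀ x ∈ memo.keys, ∀ (S : PySem.Set String) (f : Nat),
     (∀ y ∈ S, y ∉ memo.keys) → pvMu m S + 1 ≤ f →
     pyA_loop m f x S = memo.getD x "")

theorem pyB_walk_spec {m memo : PySem.Dict String String} (hnd : m.keys.Nodup) :
    ∀ (f : Nat) (node : String) (path : List String),
    path.Nodup → (∀ x ∈ path, x ∈ m.keys ∧ memo.contains x = false) →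
    pvChain m path node →
    pvMuW m memo path + 1 ≤ f →
    ∃ ext node',
      pyB_walk m memo f node path path = (path ++ ext, path ++ ext, node') ∧
      (path ++ ext).Nodup ∧ (∀ x ∈ path ++ ext, x ∈ m.keys ∧ memo.contains x = false) ∧
      pvChain m (path ++ ext) node' ∧
      (ext ≠ [] → ext.head? = some node) ∧
      (ext = [] → node' = node) ∧
      (node' ∈ path ++ ext ∨
       (node' ∉ path ++ ext ∧ memo.contains node' = true) ∨
       (m.contains node' = false ∧ memo.contains node' = false ∧ node' ∉ path ++ ext)) := by
  intro f
  induction f with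
  | zero => intro node path _ _ _ hf; omega
  | succ f ih =>
    intro node path hndp hmemp hch hf
    by_cases hin : node ∈ path
    · refine ⟨[], node, ?_, by simpa using hndp, by simpa using hmemp, by simpa using hch,
        by simp, fun _ => rfl, Or.inl (by simpa using hin)⟩
      simp only [pyB_walk]
      rw [if_neg (by simp [hin])]
      simp
    · by_cases hmemo : memo.contains node = true
      · refine ⟨[], node, ?_, by simpa using hndp, by simpa using hmemp, by simpa using hch,
          by simp, fun _ => rfl, Or.inr (Or.inl ⟨by simpa using hin, hmemo⟩)⟩
        simp only [pyB_walk]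
        rw [if_neg (by simp [hmemo])]
        simp
      · have hmemo' : memo.contains node = false := by
          cases h : memo.contains node
          · rfl
          · exact absurd h hmemo
        by_cases hkey : m.contains node = true
        · -- loop body runs
          have hstep : pyB_walk m memo (f+1) node path path
              = pyB_walk m memo f (m.getD node "") (path ++ [node]) (path ++ [node]) := by
            simp only [pyB_walk]
            rw [if_pos (by simp [hkey, hmemo', hin]), PySem.Set.add_of_not_mem hin]
          have hnd' : (path ++ [node]).Nodup := by
            simp [List.nodup_append, hndp]
            exact fun a ha he => hin (he ▸ ha)
          have hmem' : ∀ x ∈ path ++ [node], x ∈ m.keys ∧ memo.contains x = false := by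
            intro x hx
            rcases List.mem_append.1 hx with h | h
            · exact hmemp x h
            · rcases List.mem_singleton.1 h with rfl
              exact ⟨(PySem.Dict.contains_iff_mem_keys _ _).1 hkey, hmemo'⟩
          have hch' : pvChain m (path ++ [node]) (m.getD node "") := by
            refine pvChain_append.2 ⟨by simpa using hch, ?_⟩
            exact ⟨hkey, by simp, trivial⟩
          have hf' : pvMuW m memo (path ++ [node]) + 1 ≤ f := by
            unfold pvMuW at hf ⊢
            have hcongr : m.keys.filter
                  (fun k => !(memo.contains k || List.contains (path ++ [node]) k))
                = m.keys.filter
                    (fun k => !((memo.contains k || List.contains path k) || k == node)) := by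
              apply List.filter_congr; intro x _
              simp [beq_eq_decide, eq_comm, Bool.or_assoc]
            rw [hcongr]
            have := pv_filter_len_dec (bad := fun k => memo.contains k || List.contains path k)
              hnd ((PySem.Dict.contains_iff_mem_keys _ _).1 hkey) (by simp [hmemo', hin])
            beta_reduce at this
            omega
          rcases ih (m.getD node "") (path ++ [node]) hnd' hmem' hch' hf' with
            ⟨ext', node', heq, hnd2, hmem2, hch2, hhd, _, hcls⟩
          refine ⟨node :: ext', node', ?_, ?_, ?_, ?_, by simp, by simp, ?_⟩
          · rw [hstep, heq]; simp
          · simpa using hnd2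
          · simpa using hmem2
          · simpa using hch2
          · simpa using hcls
        · have hkey' : m.contains node = false := by
            cases h : m.contains node
            · rfl
            · exact absurd h hkey
          refine ⟨[], node, ?_, by simpa using hndp, by simpa using hmemp, by simpa using hch,
            by simp, fun _ => rfl, Or.inr (Or.inr ⟨hkey', hmemo', by simpa using hin⟩)⟩
          simp only [pyB_walk]
          rw [if_neg (by simp [hkey'])]
          simp

theorem pvBody_spec {m memo : PySem.Dict String String} (hnd : m.keys.Nodup)
    (hinv : pvInv m memo) (s : String) (hs : s ∈ m.keys) :
    pvInv m (pvBody m memo s) ∧ (∀ k ∈ memo.keys, k ∈ (pvBody m memo s).keys) ∧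
      s ∈ (pvBody m memo s).keys := by
  by_cases hc : memo.contains s = true
  · have hb : pvBody m memo s = memo := by simp [pvBody, hc]
    rw [hb]
    exact ⟨hinv, fun k hk => hk, (PySem.Dict.contains_iff_mem_keys _ _).1 hc⟩
  · have hc' : memo.contains s = false := by
      cases h : memo.contains s
      · rfl
      · exact absurd h hc
    have hfuel : pvMuW m memo [] + 1 ≤ m.size + 1 := by
      unfold pvMuW
      have h1 := List.length_filter_le
        (fun k => !(memo.contains k || List.contains ([] : List String) k)) m.keys
      have h2 : m.keys.length = m.size := by simp [PySem.Dict.keys, PySem.Dict.size]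
      omega
    obtain ⟨ext, node', heq, hndext, hmemext, hchext, hhd, hnil, hcls⟩ :=
      pyB_walk_spec hnd (m.size+1) s [] List.nodup_nil (by simp) trivial hfuel
    simp only [List.nil_append] at heq hndext hmemext hchext hcls
    have hext_ne : ext ≠ [] := by
      intro h
      subst h
      have hn : node' = s := hnil rfl
      subst hn
      rcases hcls with h | ⟨_, h⟩ | ⟨h, _, _⟩
      · simp at h
      · exact hc h
      · rw [(PySem.Dict.contains_iff_mem_keys _ _).2 hs] at h; cases h
    have hshead : s ∈ ext := by
      rcases hE : ext with _ | ⟨e, ext'⟩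
      · exact absurd hE hext_ne
      · have h := hhd hext_ne
        rw [hE] at h
        simp at h
        rw [h]
        exact List.mem_cons_self ..
    have hbody : pvBody m memo s = pyB_assign memo ext ext node' := by
      simp only [pvBody, hc']
      have hE : (PySem.Set.empty : PySem.Set String) = ([] : List String) := rfl
      rw [if_neg (by simp), hE, heq]
    rw [hbody]
    have hext_keys : ∀ z ∈ ext, z ∈ m.keys := fun z hz => (hmemext z hz).1
    have hext_not_memo : ∀ z ∈ ext, z ∉ memo.keys :=
      fun z hz => pv_not_mem_keys (hmemext z hz).2
    by_cases hnodein : node' ∈ ext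
    · -- the walk re-entered its own path: a freshly discovered cycle
      have hcont : PySem.Set.contains ext node' = true := by simp [hnodein]
      rcases hidx : PySem.List.index? ext node' with _ | k
      · exact absurd ((PySem.List.index?_eq_none_iff _ _).1 hidx) (by simp [hnodein])
      · obtain ⟨pre, suf, hdecomp, hlen, hpre⟩ := (PySem.List.index?_eq_some_iff _ _ _).1 hidx
        have hassign : pyB_assign memo ext ext node'
            = (ext.drop k).foldl (fun mm p => mm.insert p p)
                ((ext.take k).foldl (fun mm p => mm.insert p node') memo) := by
          simp only [pyB_assign, hcont, hidx]
          simp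
        have htake : ext.take k = pre := by rw [hdecomp, ← hlen]; exact List.take_left
        have hdrop : ext.drop k = node' :: suf := by rw [hdecomp, ← hlen]; exact List.drop_left
        have hndsuf : (node' :: suf).Nodup := (hdecomp ▸ hndext).of_append_right
        have hget : ∀ x, (pyB_assign memo ext ext node').get? x
            = if x ∈ node' :: suf then some x else if x ∈ pre then some node'
              else memo.get? x := by
          intro x
          rw [hassign, htake, hdrop, foldl_insert_self_get? _ _ _ hndsuf,
            foldl_insert_const_get?]
        have hkeys' : ∀ x, x ∈ (pyB_assign memo ext ext node').keys ↔ x ∈ ext ∨ x ∈ memo.keys := by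
          intro x
          rw [pv_mem_keys_iff_get?, hget, pv_mem_keys_iff_get? (d := memo), hdecomp]
          by_cases h1 : x ∈ node' :: suf
          · simp [h1, List.mem_append]
          · by_cases h2 : x ∈ pre
            · simp [h1, h2, List.mem_append]
            · simp [h1, h2, List.mem_append]
        refine ⟨⟨?_, ?_⟩, fun k hk => (hkeys' k).2 (Or.inr hk), (hkeys' s).2 (Or.inl hshead)⟩
        · intro k hk
          rcases (hkeys' k).1 hk with h | h
          · exact hext_keys k h
          · exact hinv.1 k h
        · intro x hx S f hS hf
          have hSm : ∀ y ∈ S, y ∉ memo.keys := fun y hy hym => hS y hy ((hkeys' y).2 (Or.inr hym))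
          have hSe : ∀ y ∈ S, y ∉ ext := fun y hy hye => hS y hy ((hkeys' y).2 (Or.inl hye))
          have hdisS : ∀ z ∈ ext, z ∉ S := fun z hz hzS => hSe z hzS hz
          rcases (hkeys' x).1 hx with hxe | hxm
          · rw [hdecomp] at hxe
            rcases List.mem_append.1 hxe with hxpre | hxcyc
            · -- x is on the tail before the cycle: resolves to node'
              have hval := pvVal_tail hnd (hdecomp ▸ hchext) (hdecomp ▸ hndext)
                (fun z hz => hext_keys z (by rw [hdecomp]; exact hz))
                (fun z hz => hdisS z (by rw [hdecomp]; exact hz)) hxpre hf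
              rw [hval]
              have hx_not_cyc : x ∉ node' :: suf := by
                have hn := List.nodup_append.1 (hdecomp ▸ hndext)
                exact fun hmem => hn.2.2 x hxpre x hmem rfl
              have hsome : (pyB_assign memo ext ext node').get? x = some node' := by
                rw [hget]; simp [hx_not_cyc, hxpre]
              rw [PySem.Dict.getD_of_get?_eq_some _ _ hsome]
            · -- x is on the cycle: resolves to itself
              obtain ⟨d1, d2, hd1⟩ := List.append_of_mem hxcyc
              have hchsuf : pvChain m (d1 ++ x :: d2) node' := by
                have h1 : pvChain m (node' :: suf) node' :=
                  (pvChain_append.1 (hdecomp ▸ hchext)).2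
                rwa [hd1] at h1
              obtain ⟨hchd1, hchxd2⟩ := pvChain_append.1 hchsuf
              simp only [List.headD_cons] at hchd1
              have hchrot : pvChain m ((x :: d2) ++ d1) x := by
                apply pvChain_append.2
                refine ⟨?_, hchd1⟩
                cases d1 with
                | nil =>
                  simp only [List.headD_nil]
                  have hxn : node' = x := by
                    rw [List.nil_append] at hd1
                    exact (List.cons.injEq .. ▸ hd1).1
                  rwa [hxn] at hchxd2
                | cons h1 t1 =>
                  have hh : node' = h1 := (List.cons.injEq .. ▸ hd1).1
                  simp only [List.headD_cons]
                  rwa [hh] at hchxd2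
              have hndrot : ((x :: d2) ++ d1).Nodup := by
                have h1 : (d1 ++ x :: d2).Nodup := by rw [← hd1]; exact hndsuf
                exact List.perm_append_comm.nodup h1
              have hsubrot : ∀ z ∈ (x :: d2) ++ d1, z ∈ ext := by
                intro z hz
                rw [hdecomp]
                apply List.mem_append_right
                rw [hd1]
                rcases List.mem_append.1 hz with h | h
                · exact List.mem_append_right _ h
                · exact List.mem_append_left _ h
              have hval := pvVal_cycle hnd hchrot (by simp)
                (List.mem_append_left _ (List.mem_cons_self ..)) hndrot
                (fun z hz => hext_keys z (hsubrot z hz))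
                (fun z hz => hdisS z (hsubrot z hz)) hf
              rw [hval]
              have hsome : (pyB_assign memo ext ext node').get? x = some x := by
                rw [hget]; simp [hxcyc]
              rw [PySem.Dict.getD_of_get?_eq_some _ _ hsome]
          · -- an already-memoized key: its stored value and its chain are untouched
            have hxe : x ∉ ext := fun h => hext_not_memo x h hxm
            have hgx : (pyB_assign memo ext ext node').get? x = memo.get? x := by
              rw [hget]
              have h1 : x ∉ node' :: suf :=
                fun h => hxe (by rw [hdecomp]; exact List.mem_append_right _ h)
              have h2 : x ∉ pre :=
                fun h => hxe (by rw [hdecomp]; exact List.mem_append_left _ h)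
              simp [h1, h2]
            rw [PySem.Dict.getD_eq_get?_getD, hgx, ← PySem.Dict.getD_eq_get?_getD]
            exact hinv.2 x hxm S f hSm hf
    · -- the walk ended off its own path: a dead end or an already-memoized node
      have hcont : PySem.Set.contains ext node' = false := by simp [hnodein]
      have hassign : pyB_assign memo ext ext node'
          = ext.foldl (fun mm p => mm.insert p (memo.getD node' node')) memo := by
        simp only [pyB_assign, hcont]
        simp
      have hget : ∀ x, (pyB_assign memo ext ext node').get? x
          = if x ∈ ext then some (memo.getD node' node') else memo.get? x := by
        intro x
        rw [hassign, foldl_insert_const_get?]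
      have hkeys' : ∀ x, x ∈ (pyB_assign memo ext ext node').keys ↔ x ∈ ext ∨ x ∈ memo.keys := by
        intro x
        rw [pv_mem_keys_iff_get?, hget, pv_mem_keys_iff_get? (d := memo)]
        by_cases h1 : x ∈ ext
        · simp [h1]
        · simp [h1]
      refine ⟨⟨?_, ?_⟩, fun k hk => (hkeys' k).2 (Or.inr hk), (hkeys' s).2 (Or.inl hshead)⟩
      · intro k hk
        rcases (hkeys' k).1 hk with h | h
        · exact hext_keys k h
        · exact hinv.1 k h
      · intro x hx S f hS hf
        have hSm : ∀ y ∈ S, y ∉ memo.keys := fun y hy hym => hS y hy ((hkeys' y).2 (Or.inr hym))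
        have hSe : ∀ y ∈ S, y ∉ ext := fun y hy hye => hS y hy ((hkeys' y).2 (Or.inl hye))
        have hdisS : ∀ z ∈ ext, z ∉ S := fun z hz hzS => hSe z hzS hz
        rcases (hkeys' x).1 hx with hxe | hxm
        · obtain ⟨c, g, hsub, heq2, hg⟩ :=
            pvVal_to_stop hnd hchext hndext hext_keys hdisS hxe hf
          rw [heq2]
          have hsome : (pyB_assign memo ext ext node').get? x
              = some (memo.getD node' node') := by
            rw [hget]; simp [hxe]
          rw [PySem.Dict.getD_of_get?_eq_some _ _ hsome]
          rcases hcls with h | ⟨_, hm⟩ | ⟨hnk, hnm, _⟩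
          · exact absurd h hnodein
          · -- continue into an already-memoized region
            have hnkeys : node' ∈ memo.keys := (PySem.Dict.contains_iff_mem_keys _ _).1 hm
            have hdis' : ∀ y ∈ S ++ c, y ∉ memo.keys := by
              intro y hy
              rcases List.mem_append.1 hy with h | h
              · exact hSm y h
              · exact hext_not_memo y (hsub y h)
            rw [hinv.2 node' hnkeys (S ++ c) g hdis' hg]
            exact pv_getD_default_of_mem hnkeys "" node'
          · -- dead end: node' is not a key of m
            rw [pyA_loop_stop (by simp [hnk]) (by omega)]
            rw [PySem.Dict.getD_of_not_contains _ _ hnm]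
        · have hxe : x ∉ ext := fun h => hext_not_memo x h hxm
          have hgx : (pyB_assign memo ext ext node').get? x = memo.get? x := by
            rw [hget]; simp [hxe]
          rw [PySem.Dict.getD_eq_get?_getD, hgx, ← PySem.Dict.getD_eq_get?_getD]
          exact hinv.2 x hxm S f hSm hf

theorem pvFold_inv {m : PySem.Dict String String} (hnd : m.keys.Nodup) :
    ∀ (ks : List String) (memo : PySem.Dict String String),
    (∀ s ∈ ks, s ∈ m.keys) → pvInv m memo →
    pvInv m (ks.foldl (pvBody m) memo) ∧
      (∀ k ∈ memo.keys, k ∈ (ks.foldl (pvBody m) memo).keys) ∧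
      (∀ s ∈ ks, s ∈ (ks.foldl (pvBody m) memo).keys) := by
  intro ks
  induction ks with
  | nil => intro memo _ hinv; exact ⟨hinv, fun k hk => hk, by simp⟩
  | cons a ks ih =>
    intro memo hks hinv
    obtain ⟨hinv', hmono, hain⟩ := pvBody_spec hnd hinv a (hks a (List.mem_cons_self ..))
    obtain ⟨h1, h2, h3⟩ := ih (pvBody m memo a)
      (fun x hx => hks x (List.mem_cons_of_mem _ hx)) hinv'
    refine ⟨h1, fun k hk => h2 k (hmono k hk), ?_⟩
    intro x hx
    rcases List.mem_cons.1 hx with rfl | hx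
    · exact h2 x hain
    · exact h3 x hx

theorem pv_final (l : List (String × String)) :
    collapse_article_remap_py l = collapse_article_remap_py_alt l := by
  set m := PySem.Dict.ofList l with hm
  have hnd : m.keys.Nodup := PySem.Dict.nodup_keys_ofList l
  have hinv0 : pvInv m PySem.Dict.empty := by
    constructor
    · intro k hk
      simp [PySem.Dict.keys_empty] at hk
    · intro x hx
      simp [PySem.Dict.keys_empty] at hx
  obtain ⟨hinvF, _, hallF⟩ :=
    pvFold_inv hnd m.keys PySem.Dict.empty (fun s hs => hs) hinv0
  have hkey : ∀ k ∈ m.keys,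
      pyA_loop m (m.size+1) (m.getD k "") (PySem.Set.ofList [k])
        = (m.keys.foldl (pvBody m) PySem.Dict.empty).getD k k := by
    intro k hk
    have hkF : k ∈ (m.keys.foldl (pvBody m) PySem.Dict.empty).keys := hallF k hk
    have hsz : pvMu m [] = m.size := by
      unfold pvMu
      simp [PySem.Dict.keys, PySem.Dict.size]
    have hv := hinvF.2 k hkF [] (m.size+2) (by intro y hy; cases hy) (by omega)
    have hstep : pyA_loop m (m.size+1+1) k [] =
        pyA_loop m (m.size+1) (m.getD k "") (PySem.Set.add [] k) := by
      simp [pyA_loop, (PySem.Dict.contains_iff_mem_keys _ _).2 hk]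
    have hof : (PySem.Set.ofList [k] : PySem.Set String) = PySem.Set.add [] k := rfl
    rw [hof, ← hstep]
    rw [show m.size + 1 + 1 = m.size + 2 from rfl, hv]
    exact pv_getD_default_of_mem hkF "" k
  show (m.items.foldl (fun (collapsed : PySem.Dict String String) p =>
      let r := pyA_loop m (m.size + 1) p.2 (PySem.Set.ofList [p.1])
      if r ≠ p.1 then collapsed.insert p.1 r else collapsed)
    PySem.Dict.empty).items
    = ((m.keys.foldl (pvBody m) PySem.Dict.empty |>
        fun memo => m.keys.foldl (fun (out : PySem.Dict String String) s =>
          let t := memo.getD s s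
          if t ≠ s then out.insert s t else out) PySem.Dict.empty).items)
  rw [PySem.Dict.items_eq_map_keys m hnd "", List.foldl_map]
  apply congrArg
  apply PySem.List.foldl_congr_mem
  intro acc x hx
  simp only []
  rw [hkey x hx]

-- ===== VERDICT (by name: the statement is the Claim_ definition above) =====
theorem collapse_article_remap_py_spec : Claim_equal_collapse_article_remap_py := by
  intro l _
  show collapse_article_remap_py l = collapse_article_remap_py_alt l
  exact pv_final l
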